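-- pv_equiv track=rewrite | github.com/CGJackson/FockConstructor | construct_Fock_operators.py | _anticommutation_factor
-- ===== SOURCE A (Python) =====
-- def _anticommutation_factor(many_particle_state: int, initial_position: int, final_position: int) -> int:
--     """
--     Calculate the sign factor needed to move an operator from initial_position to final_position in the sequence
--     of creation operators that create many_particle_state from the vacuum, assuming that it anticommutes with all
--     creation operators it encounters
--     :param many_particle_state:
--     :param initial_position:
--     :param final_position:
--     :return: sign factor
--     """
--     initial_position, final_position = max(initial_position, final_position), min(initial_position, final_position)
--     mask = ~(-1 << (initial_position - final_position))
--     intermediate_states = (many_particle_state >> final_position) & mask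
--     sign_factor = 1
--     while intermediate_states:
--         if 1 & intermediate_states:
--             sign_factor *= -1
--         intermediate_states >>= 1
--     return sign_factor
-- ===== SOURCE B (Python) =====
-- def _anticommutation_factor(many_particle_state: int, initial_position: int, final_position: int) -> int:
--     """Sign from anticommuting past the occupied modes strictly between the two positions.
--
--     No mask is built: the window of modes is isolated arithmetically by reducing the
--     state modulo 2**upper and shifting off the modes below lower; its parity is then
--     taken with Kernighan's set-bit-clearing loop, one sign flip per occupied mode.
--     """
--     lower = min(initial_position, final_position)
--     upper = max(initial_position, final_position)
--     window = (many_particle_state % (1 << upper)) >> lower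
--     sign = 1
--     while window:
--         window &= window - 1
--         sign = -sign
--     return sign
-- ===== Notes on version B (the rewrite author's own statement) =====
-- stated objective: alternative
-- what changed: A builds an all-ones mask (~(-1 << width)), ANDs it onto the shifted state, and scans the window bit-position by bit-position with a shift-and-test while loop; B builds no mask: it isolates the window arithmetically ((state % (1 << upper)) >> lower) and takes its parity with Kernighan's set-bit-clearing loop (window &= window - 1), one unconditional sign flip per occupied mode.
import Mathlib
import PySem

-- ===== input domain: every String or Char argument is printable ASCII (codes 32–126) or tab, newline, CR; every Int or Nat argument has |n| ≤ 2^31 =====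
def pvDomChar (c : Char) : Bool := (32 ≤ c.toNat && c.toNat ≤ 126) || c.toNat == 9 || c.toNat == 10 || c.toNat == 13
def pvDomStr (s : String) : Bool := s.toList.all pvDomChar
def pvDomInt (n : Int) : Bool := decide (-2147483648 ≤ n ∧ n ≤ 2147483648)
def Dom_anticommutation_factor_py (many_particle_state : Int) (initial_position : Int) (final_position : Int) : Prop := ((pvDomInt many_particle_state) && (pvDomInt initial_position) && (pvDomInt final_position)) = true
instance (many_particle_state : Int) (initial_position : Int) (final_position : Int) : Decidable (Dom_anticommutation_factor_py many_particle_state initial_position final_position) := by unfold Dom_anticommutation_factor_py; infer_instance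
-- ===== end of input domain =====

-- B builds no mask: it isolates the window of modes arithmetically (state mod 2^upper,
-- shifted by lower) and takes its parity with Kernighan's set-bit-clearing loop.

-- ===== PORT A =====
-- A's while loop. intermediate_states = (state >> lo) & mask with mask = 2^d - 1 ≥ 0 is
-- nonnegative, so the Python loop variable is carried exactly as a Nat.
def pvLoopA (intermediate_states : Nat) (sign_factor : Int) : Int :=
  if intermediate_states = 0 then sign_factor
  else pvLoopA (intermediate_states >>> 1)
        (if 1 &&& intermediate_states = 1 then -sign_factor else sign_factor)
  termination_by intermediate_states
  decreasing_by simp [Nat.shiftRight_one]; omega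

def anticommutation_factor_py (many_particle_state : Int) (initial_position : Int) (final_position : Int) : Int :=
  -- initial_position, final_position = max(...), min(...)
  let initial_position' : Int := max initial_position final_position
  let final_position' : Int := min initial_position final_position
  -- mask = ~(-1 << (initial - final)); the shift amount is ≥ 0, .toNat is exact
  let mask : Int := Int.not (((-1) : Int) <<< (initial_position' - final_position').toNat)
  -- (state >> final) & mask; Python raises on final' < 0, excluded by Pre_
  let intermediate_states : Int := PySem.Int.band (many_particle_state >>> final_position'.toNat) mask
  pvLoopA intermediate_states.toNat 1

-- ===== PORT B =====
-- Kernighan's loop: clear the lowest set bit of the window, flip the sign, once per set bit.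
def pvLoopB (window : Nat) (sign : Int) : Int :=
  if window = 0 then sign
  else pvLoopB (window &&& (window - 1)) (-sign)
  termination_by window
  decreasing_by exact Nat.lt_of_le_of_lt Nat.and_le_right (by omega)

def anticommutation_factor_py_alt (many_particle_state : Int) (initial_position : Int) (final_position : Int) : Int :=
  let lower : Int := min initial_position final_position
  let upper : Int := max initial_position final_position
  -- (state % (1 << upper)) >> lower; Python raises on upper < 0 or lower < 0, excluded by Pre_
  let window : Int := PySem.Int.mod many_particle_state ((1 : Int) <<< upper.toNat) >>> lower.toNat
  pvLoopB window.toNat 1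

-- ===== PRECONDITION & SPEC =====
-- Python A raises ValueError ("negative shift count") on many_particle_state >> final_position
-- when the smaller of the two positions is negative; exactly those inputs are excluded.
def Pre_anticommutation_factor_py (many_particle_state : Int) (initial_position : Int) (final_position : Int) : Prop :=
  0 ≤ min initial_position final_position
instance (many_particle_state : Int) (initial_position : Int) (final_position : Int) : Decidable (Pre_anticommutation_factor_py many_particle_state initial_position final_position) := by unfold Pre_anticommutation_factor_py; infer_instance

def pvWitness_anticommutation_factor_py : Int × Int × Int := (13, 0, 4)

def Spec_anticommutation_factor_py (many_particle_state : Int) (initial_position : Int) (final_position : Int) (out : Int) : Prop := out = anticommutation_factor_py_alt many_particle_state initial_position final_position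
instance (many_particle_state : Int) (initial_position : Int) (final_position : Int) (out : Int) : Decidable (Spec_anticommutation_factor_py many_particle_state initial_position final_position out) := by unfold Spec_anticommutation_factor_py; infer_instance

-- ===== CLAIM (what is proved, stated in full; the proofs are below) =====
def Claim_equal_anticommutation_factor_py : Prop := ∀ (many_particle_state : Int) (initial_position : Int) (final_position : Int), Dom_anticommutation_factor_py many_particle_state initial_position final_position → Pre_anticommutation_factor_py many_particle_state initial_position final_position → Spec_anticommutation_factor_py many_particle_state initial_position final_position (anticommutation_factor_py many_particle_state initial_position final_position)

-- ===== LEMMAS AND PROOFS =====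

-- population count, the characterisation of A's loop
def pvPopc (n : Nat) : Nat :=
  if n = 0 then 0 else n % 2 + pvPopc (n / 2)
  termination_by n
  decreasing_by omega

theorem pvPopc_step (n : Nat) : pvPopc n = n % 2 + pvPopc (n / 2) := by
  by_cases h : n = 0
  · simp [h, pvPopc]
  · rw [pvPopc, if_neg h]

theorem pvLoopA_eq : ∀ x : Nat, ∀ s : Int, pvLoopA x s = (-1) ^ pvPopc x * s := by
  intro x
  induction x using Nat.strong_induction_on with
  | _ x ih =>
    intro s
    by_cases hx : x = 0
    · simp [hx, pvLoopA, pvPopc]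
    · rw [pvLoopA, if_neg hx, ih (x >>> 1) (by simp [Nat.shiftRight_one]; omega)]
      have hdecomp : pvPopc x = x % 2 + pvPopc (x / 2) := pvPopc_step x
      have hone : 1 &&& x = x % 2 := by rw [Nat.land_comm]; exact Nat.and_one_is_mod x
      rcases Nat.mod_two_eq_zero_or_one x with h | h <;>
        simp [Nat.shiftRight_one, hone, h, hdecomp, pow_add, pow_succ]

theorem pv_not_eq (a : Int) : Int.not a = -a - 1 := by
  cases a <;> simp [Int.not] <;> omega

-- the mask extracts a window: a & (2^d - 1) = a % 2^d, also for negative a (two's complement)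
theorem pv_band_mask (a : Int) (d : Nat) :
    PySem.Int.band a ((2 : Int) ^ d - 1) = a % 2 ^ d := by
  have hcast : ((2 : Int) ^ d) = ((2 ^ d : Nat) : Int) := by push_cast; ring
  have hepos : 0 < (2 ^ d : Nat) := Nat.two_pow_pos d
  by_cases ha : 0 ≤ a
  · rw [PySem.Int.band_of_nonneg ha (by omega)]
    have ht : ((2 : Int) ^ d - 1).toNat = 2 ^ d - 1 := by omega
    rw [ht, Nat.and_two_pow_sub_one_eq_mod]
    push_cast [Int.toNat_of_nonneg ha]
    rfl
  · -- a < 0: unfold the negative branch of band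
    have hb : (0 : Int) ≤ (2 : Int) ^ d - 1 := by omega
    rw [PySem.Int.band, if_neg ha, if_pos hb]
    have ht : ((2 : Int) ^ d - 1).toNat = 2 ^ d - 1 := by omega
    rw [ht, Nat.land_comm, Nat.and_two_pow_sub_one_eq_mod]
    -- let m = (-a-1).toNat, r = m % 2^d; goal: ↑(2^d - 1 - r) = a % 2^d
    set m : Nat := (-a - 1).toNat with hm
    set r : Nat := m % 2 ^ d with hr
    have hrlt : r < 2 ^ d := Nat.mod_lt _ hepos
    have ha' : a = -(m : Int) - 1 := by omega
    have hdvd : ((2 : Int) ^ d) ∣ (a - ((2:Int)^d - 1 - r)) := by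
      have : (a - ((2:Int)^d - 1 - r)) = -(((m - r : Nat) : Int)) - 2 ^ d := by
        have : r ≤ m := Nat.mod_le _ _
        push_cast [this]
        omega
      rw [this]
      have h2 : (2 ^ d : Nat) ∣ (m - r) := by
        have := Nat.div_add_mod m (2 ^ d)
        exact ⟨m / 2 ^ d, by omega⟩
      rcases h2 with ⟨k, hk⟩
      exact ⟨-(k : Int) - 1, by push_cast [hk]; ring⟩
    have h1 : a % 2 ^ d = ((2:Int)^d - 1 - r) % 2 ^ d :=
      Int.emod_eq_emod_iff_emod_sub_eq_zero.mpr (Int.emod_eq_zero_of_dvd hdvd)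
    have h2 : ((2:Int)^d - 1 - r) % 2 ^ d = (2:Int)^d - 1 - r :=
      Int.emod_eq_of_lt (by omega) (by omega)
    omega

-- moving a factor out of an emod: (x % (c*m)) / c = (x / c) % m
theorem pv_emod_div (x c m : Int) (hc : 0 < c) :
    (x % (c * m)) / c = (x / c) % m := by
  have hq : (x / c) / m = x / (c * m) := by rw [Int.ediv_ediv_of_nonneg (le_of_lt hc)]
  have h1 : x % (c * m) = x + (-(m * ((x / c) / m))) * c := by
    rw [Int.emod_def, hq]; ring
  rw [h1, Int.add_mul_ediv_right _ _ (ne_of_gt hc), Int.emod_def]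
  ring

theorem pvPopc_two_mul (a : Nat) : pvPopc (2 * a) = pvPopc a := by
  rcases Nat.eq_zero_or_pos a with h | h
  · simp [h, pvPopc]
  · rw [pvPopc, if_neg (by omega : 2 * a ≠ 0)]
    have h1 : (2 * a) % 2 = 0 := by omega
    have h2 : (2 * a) / 2 = a := by omega
    rw [h1, h2, Nat.zero_add]

theorem pvPopc_two_mul_add_one (a : Nat) : pvPopc (2 * a + 1) = pvPopc a + 1 := by
  rw [pvPopc]
  have h1 : (2 * a + 1) % 2 = 1 := by omega
  have h2 : (2 * a + 1) / 2 = a := by omega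
  simp [h1, h2]; omega

theorem pv_land_odd_even (a : Nat) : (2 * a + 1) &&& (2 * a) = 2 * a := by
  have := Nat.land_bit true a false a
  simpa [Nat.bit, Nat.and_self] using this

theorem pv_land_even_odd (a b : Nat) : (2 * a) &&& (2 * b + 1) = 2 * (a &&& b) := by
  have := Nat.land_bit false a true b
  simpa [Nat.bit] using this

-- Kernighan: clearing the lowest set bit removes exactly one bit from the popcount
theorem pvPopc_land_pred : ∀ x : Nat, x ≠ 0 → pvPopc (x &&& (x - 1)) + 1 = pvPopc x := by
  intro x
  induction x using Nat.strong_induction_on with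
  | _ x ih =>
    intro hx
    rcases Nat.even_or_odd x with ⟨a, ha⟩ | ⟨a, ha⟩
    · -- x = 2a, a > 0, x-1 = 2(a-1)+1
      have ha' : a ≠ 0 := by omega
      have hx2 : x = 2 * a := by omega
      rw [hx2, (by omega : 2 * a - 1 = 2 * (a - 1) + 1),
        pv_land_even_odd a (a - 1), pvPopc_two_mul, pvPopc_two_mul]
      exact ih a (by omega) ha'
    · -- x = 2a+1, x-1 = 2a
      have hx2 : x = 2 * a + 1 := by omega
      rw [hx2, (by omega : 2 * a + 1 - 1 = 2 * a),
        pv_land_odd_even, pvPopc_two_mul, pvPopc_two_mul_add_one]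

theorem pvLoopB_eq : ∀ x : Nat, ∀ s : Int, pvLoopB x s = (-1) ^ pvPopc x * s := by
  intro x
  induction x using Nat.strong_induction_on with
  | _ x ih =>
    intro s
    by_cases hx : x = 0
    · simp [hx, pvLoopB, pvPopc]
    · rw [pvLoopB, if_neg hx,
        ih (x &&& (x - 1)) (Nat.lt_of_le_of_lt Nat.and_le_right (by omega))]
      have h := pvPopc_land_pred x hx
      rw [← h, pow_succ]
      ring

-- ===== VERDICT (by name: the statement is the Claim_ definition above) =====
theorem anticommutation_factor_py_spec : Claim_equal_anticommutation_factor_py := by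
  intro s i f _ hpre
  unfold Pre_anticommutation_factor_py at hpre
  unfold Spec_anticommutation_factor_py anticommutation_factor_py anticommutation_factor_py_alt
  dsimp only
  set lo : Int := min i f with hlo
  set hi : Int := max i f with hhi
  have hlohi : lo ≤ hi := min_le_max
  set d : Nat := (hi - lo).toNat with hd
  -- A's mask is 2^d - 1
  have hmask : Int.not (((-1) : Int) <<< (hi - lo).toNat) = (2 : Int) ^ d - 1 := by
    rw [pv_not_eq, Int.shiftLeft_eq, ← hd]; ring
  rw [hmask, pv_band_mask, pvLoopA_eq, mul_one, pvLoopB_eq, mul_one]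
  -- B's window equals A's extracted window
  have hwin : PySem.Int.mod s ((1 : Int) <<< hi.toNat) >>> lo.toNat
      = (s >>> lo.toNat) % 2 ^ d := by
    have hhiN : hi.toNat = lo.toNat + d := by omega
    rw [Int.shiftLeft_eq, one_mul, PySem.Int.mod_eq_emod_of_pos (by positivity), hhiN,
      Int.shiftRight_eq_div_pow, Int.shiftRight_eq_div_pow]
    push_cast
    rw [pow_add]
    exact pv_emod_div s _ _ (by positivity)
  rw [hwin]
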